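-- pv_equiv track=rewrite | github.com/sanandans/puzzles | 269ibmponder_Jan2023/pondthisjan23_sol.py | min_len_allc_allg
-- ===== SOURCE A (Python) =====
-- def min_len_allc_allg(allc_str_len):
--     n = allc_str_len
--     tot_steps = 0
--     while n>1:
--         # C(n) or AC(n-1) -> T(n) = n steps, T(n) -> C(n-1)T = n-1 steps
--         tot_steps += (2*n) - 1
--         #C(n-2)CT -> A(n-2)CT = (4^((n-2 + ((n-2)%2))//2) - 1)/3 if n-2 is odd, and twice of that if n-2 is even
--         steps = (pow( 4, (n-2 + ((n-2)%2))//2 ) - 1)//3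
--         if (n-2)%2 == 0:
--             steps *= 2
--         tot_steps += steps
--         #A(n-2)CT -> A(n-2)CG = 1 step
--         tot_steps += 1
--         #If n-2 is odd, A(n-2)C -> AC(n-1) takes 1,2,5,10,21,42,85,170... steps. If n-2 is even, A(n-2)C -> C(n-1) takes
--         #those steps, and then minus 1
--         steps=0
--         for i in range(1, n-1):
--             steps = (steps*2) + (i%2)
--         if (n-2)%2 == 1:
--             steps -= 1
--         tot_steps += steps
--         #Now we have C(n-1) or AC(n-2), so we loop
--         n -= 1
--
--     #We now have CG(n-1), so 1 more step to make it G(n)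
--     tot_steps += 1
--     return tot_steps
-- ===== SOURCE B (Python) =====
-- def min_len_allc_allg(allc_str_len):
--     # Closed form: each loop iteration of the original contributes
--     # 2*n + (2**n - (5 if n odd else 4))//3 steps; summing n = 2..N in
--     # closed form removes both loops entirely.
--     n = allc_str_len
--     if n <= 1:
--         return 1
--     odds = (n - 1) // 2
--     return 1 + n * n + n - 2 + (2 ** (n + 1) - 4 * n - odds) // 3
-- ===== Notes on version B (the rewrite author's own statement) =====
-- stated objective: faster
-- what changed: Replaced the while-loop with an O(n^2)-iteration inner doubling loop by a single closed-form formula (geometric-series sum of the per-iteration contributions).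
import Mathlib
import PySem

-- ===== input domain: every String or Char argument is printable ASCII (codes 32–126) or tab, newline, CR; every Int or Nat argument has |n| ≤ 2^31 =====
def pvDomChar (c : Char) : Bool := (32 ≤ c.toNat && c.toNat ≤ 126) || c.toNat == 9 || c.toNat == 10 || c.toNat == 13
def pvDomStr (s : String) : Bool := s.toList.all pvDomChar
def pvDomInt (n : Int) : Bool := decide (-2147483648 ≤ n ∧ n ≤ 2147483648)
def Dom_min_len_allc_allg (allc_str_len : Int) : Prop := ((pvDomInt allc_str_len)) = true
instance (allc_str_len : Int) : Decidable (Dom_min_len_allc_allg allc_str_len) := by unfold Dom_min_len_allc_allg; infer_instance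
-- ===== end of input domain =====

-- B replaces A's nested loops by a single closed-form formula (objective: faster, asymptotic).

-- B replaces A's nested loops by a single closed-form formula (objective: faster, asymptotic).

-- ===== PORT A =====
-- the while loop of A, recursing on n; tot is tot_steps.
-- pow(4, e) with e = (n-2 + (n-2)%2)//2 : in this branch n > 1 so e >= 0 and
-- Python's pow is integer exponentiation, ported exactly as (4:Int) ^ e.toNat.
def pvLoopA (n : Int) (tot : Int) : Int :=
  if h : n > 1 then
    let tot1 := tot + (2 * n - 1)
    let steps := PySem.Int.floordiv
      ((4 : Int) ^ (PySem.Int.floordiv (n - 2 + PySem.Int.mod (n - 2) 2) 2).toNat - 1) 3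
    let steps := if PySem.Int.mod (n - 2) 2 = 0 then steps * 2 else steps
    let tot2 := tot1 + steps
    let tot3 := tot2 + 1
    let steps2 := (PySem.List.pyRange 1 (n - 1) 1).foldl
      (fun s i => s * 2 + PySem.Int.mod i 2) 0
    let steps2 := if PySem.Int.mod (n - 2) 2 = 1 then steps2 - 1 else steps2
    let tot4 := tot3 + steps2
    pvLoopA (n - 1) tot4
  else tot
termination_by n.toNat
decreasing_by omega

def min_len_allc_allg (allc_str_len : Int) : Int :=
  pvLoopA allc_str_len 0 + 1

-- ===== PORT B =====
-- 2 ** (n+1) : here n >= 2, so the exponent is nonnegative and (2:Int) ^ (n+1).toNat is exact.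
def min_len_allc_allg_alt (allc_str_len : Int) : Int :=
  if allc_str_len <= 1 then 1
  else
    let n := allc_str_len
    let odds := PySem.Int.floordiv (n - 1) 2
    1 + n * n + n - 2 +
      PySem.Int.floordiv ((2 : Int) ^ (n + 1).toNat - 4 * n - odds) 3

-- ===== PRECONDITION & SPEC =====
def Spec_min_len_allc_allg (allc_str_len : Int) (out : Int) : Prop := out = min_len_allc_allg_alt allc_str_len
instance (allc_str_len : Int) (out : Int) : Decidable (Spec_min_len_allc_allg allc_str_len out) := by unfold Spec_min_len_allc_allg; infer_instance

-- ===== CLAIM (what is proved, stated in full; the proofs are below) =====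
def Claim_equal_min_len_allc_allg : Prop := ∀ (allc_str_len : Int), Dom_min_len_allc_allg allc_str_len → Spec_min_len_allc_allg allc_str_len (min_len_allc_allg allc_str_len)

-- ===== LEMMAS AND PROOFS =====

def pvJac : Nat → Int
  | 0 => 0
  | m + 1 => 2 * pvJac m + (((m + 1) % 2 : Nat) : Int)

lemma pvJac_fold (m : Nat) :
    (PySem.List.pyRange 1 ((m : Int) + 1) 1).foldl (fun s i => s * 2 + PySem.Int.mod i 2) 0
      = pvJac m := by
  induction m with
  | zero =>
    rw [show ((0:Nat):Int) + 1 = 1 by norm_num, PySem.List.pyRange_one_eq_nil le_rfl]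
    simp [pvJac]
  | succ m ih =>
    have h : ((m : Int) + 1 + 1) = ((m : Int) + 1) + 1 := by ring
    rw [show ((m + 1 : Nat) : Int) + 1 = ((m : Int) + 1) + 1 by push_cast; ring,
        PySem.List.pyRange_one_succ_right (by omega), List.foldl_append, ih]
    simp [pvJac]
    ring

lemma pvJac_closed (m : Nat) :
    3 * pvJac m = 2 ^ (m + 1) - 2 + ((m % 2 : Nat) : Int) := by
  induction m with
  | zero => simp [pvJac]
  | succ m ih =>
    rw [pvJac]
    have h2 : (2 : Int) ^ (m + 1 + 1) = 2 * 2 ^ (m + 1) := by ring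
    have hm : (m + 1) % 2 = 1 - m % 2 := by omega
    omega

lemma pvPow2_emod3 (m : Nat) : ((2 : Int) ^ m) % 3 = if m % 2 = 0 then 1 else 2 := by
  induction m with
  | zero => simp
  | succ m ih =>
    have h2 : (2 : Int) ^ (m + 1) = 2 * 2 ^ m := by ring
    rw [h2]
    rcases Nat.even_or_odd m with h | h <;> simp [Nat.even_iff, Nat.odd_iff] at h <;>
      simp [h] at ih ⊢ <;> omega

lemma pvBase (t : Int) : pvLoopA 2 t = t + 4 := by
  rw [pvLoopA]
  norm_num [PySem.Int.mod, PySem.Int.floordiv, PySem.List.pyRange_one_eq_nil (le_refl (1:Int))]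
  rw [pvLoopA]
  norm_num
  omega

lemma pvFloordiv3 (a q : Int) (h : a = 3 * q) : PySem.Int.floordiv a 3 = q := by
  rw [PySem.Int.floordiv_eq_iff_of_pos (by norm_num)]
  omega

lemma pvStep (k : Nat) (t : Int)
    (ih : ∀ t : Int, pvLoopA ((k : Int) + 2) t = t + (min_len_allc_allg_alt ((k : Int) + 2) - 1)) :
    pvLoopA ((k : Int) + 3) t = t + (min_len_allc_allg_alt ((k : Int) + 3) - 1) := by
  rw [pvLoopA, dif_pos (show ((k : Int) + 3) > 1 by omega)]
  rw [show (k : Int) + 3 - 1 = ((k + 1 : Nat) : Int) + 1 from by push_cast; ring]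
  rw [pvJac_fold (k + 1)]
  rw [show ((k + 1 : Nat) : Int) + 1 = (k : Int) + 2 from by push_cast; ring]
  rw [ih]
  rw [show (k : Int) + 3 - 2 = ((k + 1 : Nat) : Int) from by push_cast; ring]
  rw [PySem.Int.mod_eq_emod_of_pos (by norm_num : (0:Int) < 2)]
  rw [PySem.Int.floordiv_eq_ediv_of_pos (by norm_num : (0:Int) < 2)]
  simp only [min_len_allc_allg_alt,
    if_neg (show ¬((k : Int) + 2 ≤ 1) by omega),
    if_neg (show ¬((k : Int) + 3 ≤ 1) by omega)]
  rw [PySem.Int.floordiv_eq_ediv_of_pos (a := (k:Int) + 2 - 1) (by norm_num : (0:Int) < 2)]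
  rw [PySem.Int.floordiv_eq_ediv_of_pos (a := (k:Int) + 3 - 1) (by norm_num : (0:Int) < 2)]
  rw [show ((k : Int) + 2 + 1).toNat = k + 3 from by omega]
  rw [show ((k : Int) + 3 + 1).toNat = k + 4 from by omega]
  have hj := pvJac_closed (k + 1)
  obtain ⟨j, hk2⟩ : ∃ j, k = 2 * j ∨ k = 2 * j + 1 := ⟨k / 2, by omega⟩
  rcases hk2 with hk2 | hk2 <;> subst hk2
  · -- k even
    rw [show (((2 * j + 1 : Nat) : Int)) % 2 = 1 from by omega]
    rw [if_neg (by norm_num : ¬(1 : Int) = 0), if_pos rfl]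
    rw [show (((2 * j + 1 : Nat) : Int) + 1) / 2 = (j : Int) + 1 from by omega]
    rw [show ((j : Int) + 1).toNat = j + 1 from by omega]
    have hP : ((2 : Int) ^ (2 * j)) % 3 = 1 := by
      rw [pvPow2_emod3]; simp
    obtain ⟨Q, hQ⟩ : ∃ Q, (2 : Int) ^ (2 * j) = 3 * Q + 1 := ⟨((2 : Int) ^ (2 * j) - 1) / 3, by omega⟩
    have h4 : (4 : Int) ^ (j + 1) = 12 * Q + 4 := by
      rw [show (4 : Int) = 2 ^ 2 from by norm_num, ← pow_mul,
        show 2 * (j + 1) = 2 * j + 2 from by ring, pow_add, hQ]; ring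
    have hjv : pvJac (2 * j + 1) = 4 * Q + 1 := by
      rw [show (2 : Int) ^ (2 * j + 1 + 1) = 12 * Q + 4 from by
        rw [pow_add, pow_add, hQ]; ring] at hj
      omega
    rw [h4, hjv, pvFloordiv3 _ (4 * Q + 1) (by ring)]
    rw [show (2 : Int) ^ (2 * j + 3) = 24 * Q + 8 from by rw [pow_add, hQ]; ring]
    rw [show (2 : Int) ^ (2 * j + 4) = 48 * Q + 16 from by rw [pow_add, hQ]; ring]
    rw [show ((2 * j : Nat) : Int) + 2 - 1 = 2 * (j : Int) + 1 from by push_cast; ring]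
    rw [show (2 * (j : Int) + 1) / 2 = (j : Int) from by omega]
    rw [show ((2 * j : Nat) : Int) + 3 - 1 = 2 * (j : Int) + 2 from by push_cast; ring]
    rw [show (2 * (j : Int) + 2) / 2 = (j : Int) + 1 from by omega]
    rw [pvFloordiv3 _ (8 * Q - 3 * (j : Int)) (by push_cast; ring)]
    rw [pvFloordiv3 _ (16 * Q - 3 * (j : Int) + 1) (by push_cast; ring)]
    push_cast
    ring
  · -- k odd
    rw [show (((2 * j + 1 + 1 : Nat) : Int)) % 2 = 0 from by omega]
    rw [if_pos rfl, if_neg (by norm_num : ¬(0 : Int) = 1)]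
    rw [show (((2 * j + 1 + 1 : Nat) : Int) + 0) / 2 = (j : Int) + 1 from by omega]
    rw [show ((j : Int) + 1).toNat = j + 1 from by omega]
    have hP : ((2 : Int) ^ (2 * j)) % 3 = 1 := by
      rw [pvPow2_emod3]; simp
    obtain ⟨Q, hQ⟩ : ∃ Q, (2 : Int) ^ (2 * j) = 3 * Q + 1 := ⟨((2 : Int) ^ (2 * j) - 1) / 3, by omega⟩
    have h4 : (4 : Int) ^ (j + 1) = 12 * Q + 4 := by
      rw [show (4 : Int) = 2 ^ 2 from by norm_num, ← pow_mul,
        show 2 * (j + 1) = 2 * j + 2 from by ring, pow_add, hQ]; ring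
    have hjv : pvJac (2 * j + 1 + 1) = 8 * Q + 2 := by
      rw [show (2 : Int) ^ (2 * j + 1 + 1 + 1) = 24 * Q + 8 from by
        rw [pow_add, pow_add, pow_add, hQ]; ring] at hj
      omega
    rw [h4, hjv, pvFloordiv3 _ (4 * Q + 1) (by ring)]
    rw [show (2 : Int) ^ (2 * j + 1 + 3) = 48 * Q + 16 from by
      rw [pow_add, pow_add, hQ]; ring]
    rw [show (2 : Int) ^ (2 * j + 1 + 4) = 96 * Q + 32 from by
      rw [pow_add, pow_add, hQ]; ring]
    rw [show ((2 * j + 1 : Nat) : Int) + 2 - 1 = 2 * (j : Int) + 2 from by push_cast; ring]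
    rw [show (2 * (j : Int) + 2) / 2 = (j : Int) + 1 from by omega]
    rw [show ((2 * j + 1 : Nat) : Int) + 3 - 1 = 2 * (j : Int) + 3 from by push_cast; ring]
    rw [show (2 * (j : Int) + 3) / 2 = (j : Int) + 1 from by omega]
    rw [pvFloordiv3 _ (16 * Q - 3 * (j : Int) + 1) (by push_cast; ring)]
    rw [pvFloordiv3 _ (32 * Q - 3 * (j : Int) + 5) (by push_cast; ring)]
    push_cast
    ring


lemma pvLoop_closed (k : Nat) (t : Int) :
    pvLoopA ((k : Int) + 2) t = t + (min_len_allc_allg_alt ((k : Int) + 2) - 1) := by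
  induction k generalizing t with
  | zero =>
    simp only [Nat.cast_zero, zero_add]
    rw [pvBase, show min_len_allc_allg_alt 2 = 5 from by decide]
    ring
  | succ k ih =>
    rw [show ((k + 1 : Nat) : Int) + 2 = (k : Int) + 3 from by push_cast; ring]
    exact pvStep k t ih

-- ===== VERDICT (by name: the statement is the Claim_ definition above) =====
theorem min_len_allc_allg_spec : Claim_equal_min_len_allc_allg := by
  intro L _
  unfold Spec_min_len_allc_allg min_len_allc_allg
  by_cases hL : L <= 1
  · rw [pvLoopA]
    simp [hL, min_len_allc_allg_alt, show ¬ L > 1 by omega]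
  · obtain ⟨k, hk⟩ : ∃ k : Nat, L = (k : Int) + 2 := ⟨(L - 2).toNat, by omega⟩
    subst hk
    rw [pvLoop_closed]
    ring
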